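-- pv_equiv track=rewrite | github.com/R-Graziano/Python-exercises | FindWordInText.py | findWordInText
-- ===== SOURCE A (Python) =====
-- def findWordInText(word, text):
--     word = word.lower()
--     text = text.lower()
--
--     for c in word:
--         if text.find(c) == -1:
--             return 'No'
--             break
--         else:
--             text = text[text.find(c):]
--
--
--     return 'Si'
-- ===== SOURCE B (Python) =====
-- def findWordInText(word, text):
--     w = word.lower()
--     t = text.lower()
--     # A re-finds a just-matched char at the same position, so consecutive
--     # duplicates in the word are free: collapse them, then do one greedy
--     # left-to-right subsequence scan over the text.
--     chars = [c for i, c in enumerate(w) if i == 0 or w[i - 1] != c]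
--     it = iter(t)
--     return 'Si' if all(c in it for c in chars) else 'No'
-- ===== Notes on version B (the rewrite author's own statement) =====
-- stated objective: faster
-- what changed: B collapses the word's consecutive duplicate characters (which A matches at the same text position) and replaces A's repeated text.find + slicing with a single greedy left-to-right subsequence scan of the text.
import Mathlib
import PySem

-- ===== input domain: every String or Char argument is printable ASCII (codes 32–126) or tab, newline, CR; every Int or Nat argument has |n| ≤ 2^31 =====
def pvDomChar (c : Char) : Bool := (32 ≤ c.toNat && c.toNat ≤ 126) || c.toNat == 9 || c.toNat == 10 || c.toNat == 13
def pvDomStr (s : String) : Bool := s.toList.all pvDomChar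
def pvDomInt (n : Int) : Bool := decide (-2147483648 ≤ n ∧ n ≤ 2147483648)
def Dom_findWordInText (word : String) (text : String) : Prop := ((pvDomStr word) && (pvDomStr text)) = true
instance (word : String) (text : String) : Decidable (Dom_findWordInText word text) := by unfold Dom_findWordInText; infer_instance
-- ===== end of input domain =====

-- B collapses the word's consecutive duplicate characters (which A re-finds at the
-- same text position) and then does one greedy left-to-right subsequence scan over
-- the text, instead of A's repeated text.find + slice per word character.

-- ===== PORT A =====
-- A's loop: for c in word: if text.find(c) == -1: return 'No' else: text = text[text.find(c):]
def findWordInTextLoopA : List Char → List Char → String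
  | [], _ => "Si"
  | c :: cs, t =>
    let f := PySem.Chars.find t [c]
    if f = -1 then "No"
    else findWordInTextLoopA cs (PySem.List.slice t (some f) none)

def findWordInText (word : String) (text : String) : String :=
  findWordInTextLoopA (PySem.Chars.lower word.toList) (PySem.Chars.lower text.toList)

-- ===== PORT B =====
-- [c for i, c in enumerate(w) if i == 0 or w[i-1] != c]  (collapse consecutive duplicates)
def findWordInTextDedup : List Char → List Char
  | [] => []
  | [c] => [c]
  | c :: d :: rest => if c = d then findWordInTextDedup (d :: rest)
                      else c :: findWordInTextDedup (d :: rest)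

-- the iterator scan: all(c in it for c in chars)
def findWordInTextScan : List Char → List Char → Bool
  | [], _ => true
  | _ :: _, [] => false
  | c :: cs, x :: xs => if x = c then findWordInTextScan cs xs
                        else findWordInTextScan (c :: cs) xs

def findWordInText_alt (word : String) (text : String) : String :=
  if findWordInTextScan (findWordInTextDedup (PySem.Chars.lower word.toList))
       (PySem.Chars.lower text.toList) then "Si" else "No"

-- ===== PRECONDITION & SPEC =====
def Spec_findWordInText (word : String) (text : String) (out : String) : Prop := out = findWordInText_alt word text
instance (word : String) (text : String) (out : String) : Decidable (Spec_findWordInText word text out) := by unfold Spec_findWordInText; infer_instance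

-- ===== CLAIM (what is proved, stated in full; the proofs are below) =====
def Claim_equal_findWordInText : Prop := ∀ (word : String) (text : String), Dom_findWordInText word text → Spec_findWordInText word text (findWordInText word text)

-- ===== LEMMAS AND PROOFS =====

-- the dedup of a nonempty list keeps its head
theorem findWordInTextDedup_cons (c : Char) (cs : List Char) :
    ∃ tl, findWordInTextDedup (c :: cs) = c :: tl := by
  induction cs generalizing c with
  | nil => exact ⟨[], rfl⟩
  | cons d rest ih =>
    obtain ⟨tl, htl⟩ := ih d
    by_cases h : c = d
    · exact ⟨tl, by simp [findWordInTextDedup, h, htl]⟩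
    · exact ⟨findWordInTextDedup (d :: rest), by simp [findWordInTextDedup, h]⟩

theorem findWordInTextScan_not_mem (c : Char) (cs t : List Char) (h : c ∉ t) :
    findWordInTextScan (c :: cs) t = false := by
  induction t with
  | nil => rfl
  | cons x xs ih =>
    simp only [List.mem_cons, not_or] at h
    simp [findWordInTextScan, Ne.symm h.1, ih h.2]

-- the scan skips a block containing no c while it waits for c
theorem findWordInTextScan_skip (c : Char) (cs u ts : List Char) (h : c ∉ u) :
    findWordInTextScan (c :: cs) (u ++ ts) = findWordInTextScan (c :: cs) ts := by
  induction u with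
  | nil => rfl
  | cons x xs ih =>
    simp only [List.mem_cons, not_or] at h
    simp [findWordInTextScan, Ne.symm h.1, ih h.2]

theorem findWordInText_singleton_infix (c : Char) (t : List Char) : [c] <:+: t ↔ c ∈ t := by
  constructor
  · rintro ⟨s, r, hs⟩; subst hs; simp
  · intro h
    obtain ⟨u, v, huv⟩ := List.append_of_mem h
    exact ⟨u, v, by simp [huv]⟩

-- characterisation of text.find(c) when it succeeds: first occurrence of c
theorem findWordInText_find_found (c : Char) (t : List Char)
    (h : PySem.Chars.find t [c] ≠ -1) :
    ∃ (n : ℕ) (v : List Char), PySem.Chars.find t [c] = (n : Int) ∧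
      t.drop n = c :: v ∧ c ∉ t.take n := by
  have hspec := PySem.Chars.findFrom_natCast_spec t [c] 0 (Nat.zero_le _)
  rw [Nat.cast_zero, PySem.Chars.findFrom_zero] at hspec
  obtain ⟨h0, hpre, hmin⟩ := hspec h
  refine ⟨(PySem.Chars.find t [c]).toNat, ?_⟩
  obtain ⟨v, hv⟩ := hpre
  refine ⟨v, (Int.toNat_of_nonneg h0).symm, by simpa using hv.symm, ?_⟩
  intro hmem
  obtain ⟨i, hi, hgi⟩ := List.getElem_of_mem hmem
  have hilt : i < (PySem.Chars.find t [c]).toNat := lt_of_lt_of_le hi (by simp [List.length_take])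
  have hit : i < t.length := lt_of_lt_of_le hilt (by
    have := List.length_drop (l := t) (i := (PySem.Chars.find t [c]).toNat)
    by_cases hle : (PySem.Chars.find t [c]).toNat ≤ t.length
    · omega
    · rw [List.drop_eq_nil_of_le (by omega)] at hv; exact absurd hv.symm (by simp))
  apply hmin i (Nat.zero_le _) hilt
  refine ⟨t.drop (i + 1), ?_⟩
  rw [List.getElem_take] at hgi
  simp [List.drop_eq_getElem_cons hit, hgi]

theorem findWordInText_main : ∀ (w t : List Char),
    findWordInTextLoopA w t =
      (if findWordInTextScan (findWordInTextDedup w) t then "Si" else "No") := by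
  intro w
  induction w with
  | nil => intro t; simp [findWordInTextLoopA, findWordInTextDedup, findWordInTextScan]
  | cons c cs ih =>
    intro t
    by_cases hf : PySem.Chars.find t [c] = -1
    · have hmem : c ∉ t := by
        have := (PySem.Chars.find_eq_neg_one_iff t [c]).mp hf
        simpa [findWordInText_singleton_infix] using this
      obtain ⟨tl, htl⟩ := findWordInTextDedup_cons c cs
      simp [findWordInTextLoopA, hf, htl, findWordInTextScan_not_mem c tl t hmem]
    · obtain ⟨n, v, hfn, hdrop, htake⟩ := findWordInText_find_found c t hf
      have hslice : PySem.List.slice t (some (PySem.Chars.find t [c])) none = c :: v := by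
        rw [hfn, PySem.List.slice_from t (by positivity)]
        simpa using hdrop
      have hL : findWordInTextLoopA (c :: cs) t = findWordInTextLoopA cs (c :: v) := by
        simp [findWordInTextLoopA, hf, hslice]
      obtain ⟨tl, htl⟩ := findWordInTextDedup_cons c cs
      have hsc : findWordInTextScan (findWordInTextDedup (c :: cs)) t
               = findWordInTextScan (findWordInTextDedup (c :: cs)) (c :: v) := by
        conv_lhs => rw [htl, ← List.take_append_drop n t]
        rw [findWordInTextScan_skip c tl _ _ htake, hdrop, ← htl]
      rw [hL, hsc]
      match cs with
      | [] => simp [findWordInTextLoopA, findWordInTextDedup, findWordInTextScan]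
      | d :: cs₂ =>
        by_cases hcd : c = d
        · subst hcd
          rw [show findWordInTextDedup (c :: c :: cs₂) = findWordInTextDedup (c :: cs₂) from by
            simp [findWordInTextDedup]]
          exact ih (c :: v)
        · rw [show findWordInTextDedup (c :: d :: cs₂) = c :: findWordInTextDedup (d :: cs₂) from by
            simp [findWordInTextDedup, hcd]]
          obtain ⟨tl', htl'⟩ := findWordInTextDedup_cons d cs₂
          rw [show findWordInTextScan (c :: findWordInTextDedup (d :: cs₂)) (c :: v)
                 = findWordInTextScan (findWordInTextDedup (d :: cs₂)) v from by
            simp [findWordInTextScan]]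
          rw [show findWordInTextScan (findWordInTextDedup (d :: cs₂)) v
                 = findWordInTextScan (findWordInTextDedup (d :: cs₂)) (c :: v) from by
            rw [htl']; simp [findWordInTextScan, hcd]]
          exact ih (c :: v)

-- ===== VERDICT (by name: the statement is the Claim_ definition above) =====
theorem findWordInText_spec : Claim_equal_findWordInText := by
  intro word text _
  unfold Spec_findWordInText findWordInText findWordInText_alt
  exact findWordInText_main _ _
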